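-- pv_equiv track=rewrite | github.com/deepredpark/algorithm | BOJ/greedy/p11497.py | level_print
-- ===== SOURCE A (Python) =====
-- def level_print(woods, n):
--   woods.sort()
--   woods_weight = [0] * n
--
--   left = 0
--   right = -1
--   for i in range(n):
--     if i % 2 == 0:
--       woods_weight[left] = woods[i]
--       left += 1
--     else:
--       woods_weight[right] = woods[i]
--       right -= 1
--
--   level = woods_weight[-1] - woods_weight[0]
--   for i in range(n-1):
--     if level < abs(woods_weight[i] - woods_weight[i+1]):
--       level = abs(woods_weight[i] - woods_weight[i+1])
--
--   return level
-- ===== SOURCE B (Python) =====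
-- def level_print(woods, n):
--   woods.sort()
--   if n == 1:
--     return 0
--   level = woods[1] - woods[0]
--   for i in range(n - 2):
--     if woods[i + 2] - woods[i] > level:
--       level = woods[i + 2] - woods[i]
--   return level
-- ===== Notes on version B (the rewrite author's own statement) =====
-- stated objective: simpler
-- what changed: Instead of building the alternating circle arrangement in an auxiliary array and scanning its adjacent gaps, B reads the maximal circular gap directly off the sorted list as the maximum of woods[1]-woods[0] and the two-apart differences woods[i+2]-woods[i], with no auxiliary array.
import Mathlib
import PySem

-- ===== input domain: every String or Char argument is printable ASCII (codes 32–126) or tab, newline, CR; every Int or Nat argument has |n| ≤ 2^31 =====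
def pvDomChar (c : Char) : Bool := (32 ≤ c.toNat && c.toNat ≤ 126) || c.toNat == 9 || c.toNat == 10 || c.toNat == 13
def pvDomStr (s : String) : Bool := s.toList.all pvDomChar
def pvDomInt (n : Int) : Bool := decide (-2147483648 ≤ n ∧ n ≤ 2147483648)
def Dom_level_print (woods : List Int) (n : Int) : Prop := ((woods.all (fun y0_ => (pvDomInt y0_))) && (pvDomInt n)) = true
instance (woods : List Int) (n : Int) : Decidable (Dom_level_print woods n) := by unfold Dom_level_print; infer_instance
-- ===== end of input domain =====

-- B derives the same maximal circular gap directly from the sorted list's two-apart differences,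
-- with no auxiliary arrangement array; both versions sort `woods` in place (the claim is about the
-- RETURN value only).

-- B derives the same maximal circular gap directly from the sorted list's two-apart
-- differences, with no auxiliary arrangement array; both Pythons sort `woods` in place
-- (the claim is about the RETURN value only).

-- ===== PORT A =====
def level_print (woods : List Int) (n : Int) : Int :=
  let ws := PySem.List.sorted woods (fun x => x) false
  let ww0 : List Int := PySem.List.pyRepeat [0] n
  let st := (PySem.List.pyRange 0 n 1).foldl
      (fun (st : List Int × Int × Int) i =>
        if PySem.Int.mod i 2 = 0 then
          (PySem.List.pySetD st.1 st.2.1 (PySem.List.pyGetD ws i 0), st.2.1 + 1, st.2.2)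
        else
          (PySem.List.pySetD st.1 st.2.2 (PySem.List.pyGetD ws i 0), st.2.1, st.2.2 - 1))
      (ww0, (0 : Int), (-1 : Int))
  let ww := st.1
  let level := PySem.List.pyGetD ww (-1) 0 - PySem.List.pyGetD ww 0 0
  (PySem.List.pyRange 0 (n - 1) 1).foldl
    (fun level i =>
      if level < |PySem.List.pyGetD ww i 0 - PySem.List.pyGetD ww (i + 1) 0| then
        |PySem.List.pyGetD ww i 0 - PySem.List.pyGetD ww (i + 1) 0|
      else level)
    level

-- ===== PORT B =====
def level_print_alt (woods : List Int) (n : Int) : Int :=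
  let ws := PySem.List.sorted woods (fun x => x) false
  if n = 1 then 0
  else
    let level := PySem.List.pyGetD ws 1 0 - PySem.List.pyGetD ws 0 0
    (PySem.List.pyRange 0 (n - 2) 1).foldl
      (fun level i =>
        if PySem.List.pyGetD ws (i + 2) 0 - PySem.List.pyGetD ws i 0 > level then
          PySem.List.pyGetD ws (i + 2) 0 - PySem.List.pyGetD ws i 0
        else level)
      level

-- ===== PRECONDITION & SPEC =====
-- A raises IndexError when n < 1 (woods_weight[-1] on an empty auxiliary array) or when
-- n > len(woods) (woods[i] out of range); Pre_ admits exactly the inputs where A returns.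
def Pre_level_print (woods : List Int) (n : Int) : Prop := 1 ≤ n ∧ n ≤ (woods.length : Int)
instance (woods : List Int) (n : Int) : Decidable (Pre_level_print woods n) := by
  unfold Pre_level_print; infer_instance

def pvWitness_level_print : List Int × Int := ([3, 1, 4, 2], 3)

def Spec_level_print (woods : List Int) (n : Int) (out : Int) : Prop := out = level_print_alt woods n
instance (woods : List Int) (n : Int) (out : Int) : Decidable (Spec_level_print woods n out) := by
  unfold Spec_level_print; infer_instance

-- ===== CLAIM (what is proved, stated in full; the proofs are below) =====
def Claim_equal_level_print : Prop := ∀ (woods : List Int) (n : Int), Dom_level_print woods n → Pre_level_print woods n → Spec_level_print woods n (level_print woods n)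

-- ===== LEMMAS AND PROOFS =====

def pvEvens : List Int → List Int
  | [] => []
  | [a] => [a]
  | a :: _ :: l => a :: pvEvens l

def pvOdds : List Int → List Int
  | [] => []
  | [_] => []
  | _ :: b :: l => b :: pvOdds l

theorem length_pvEvens (t : List Int) : (pvEvens t).length = (t.length + 1) / 2 := by
  fun_induction pvEvens t <;> simp [*] <;> omega

theorem length_pvOdds (t : List Int) : (pvOdds t).length = t.length / 2 := by
  fun_induction pvOdds t <;> simp [*] <;> omega

theorem getElem_pvEvens : ∀ (j : Nat) (t : List Int) (hj : j < (pvEvens t).length)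
    (hj2 : 2 * j < t.length), (pvEvens t)[j] = t[2 * j]
  | 0, [a], _, _ => rfl
  | 0, a :: b :: l, _, _ => rfl
  | (j+1), a :: b :: l, hj, hj2 => by
    have := getElem_pvEvens j l (by simpa [pvEvens] using hj) (by simp at hj2 ⊢; omega)
    simpa [pvEvens, List.getElem_cons_succ, show 2*(j+1) = (2*j)+1+1 by ring] using this

theorem getElem_pvOdds : ∀ (j : Nat) (t : List Int) (hj : j < (pvOdds t).length)
    (hj2 : 2 * j + 1 < t.length), (pvOdds t)[j] = t[2 * j + 1]
  | 0, a :: b :: l, _, _ => rfl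
  | (j+1), a :: b :: l, hj, hj2 => by
    have := getElem_pvOdds j l (by simpa [pvOdds] using hj) (by simp at hj2 ⊢; omega)
    simpa [pvOdds, List.getElem_cons_succ, show 2*(j+1)+1 = (2*j+1)+1+1 by ring] using this

def pvArr (t : List Int) : List Int := pvEvens t ++ (pvOdds t).reverse

theorem length_pvArr (t : List Int) : (pvArr t).length = t.length := by
  simp [pvArr, length_pvEvens, length_pvOdds]; omega

theorem getElem_pvArr (t : List Int) (j : Nat) (hj : j < t.length) :
    (pvArr t)[j]'(by rw [length_pvArr]; exact hj) =
      if h2 : 2 * j < t.length then t[2 * j]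
      else t[2 * (t.length - 1 - j) + 1]'(by omega) := by
  simp only [pvArr]
  rw [List.getElem_append]
  split
  · rename_i h
    rw [length_pvEvens] at h
    rw [dif_pos (by omega)]
    exact getElem_pvEvens j t (by rw [length_pvEvens]; omega) (by omega)
  · rename_i h
    rw [length_pvEvens] at h
    rw [dif_neg (by omega)]
    rw [List.getElem_reverse]
    rw [getElem_pvOdds _ t (by rw [length_pvOdds] at *; omega) (by rw [length_pvOdds] at *; omega)]
    congr 1
    rw [length_pvOdds, length_pvEvens] at *
    omega

theorem pvSetD_neg (xs : List Int) (q : Nat) (v : Int) (h : q < xs.length) :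
    PySem.List.pySetD xs (-((q : Int) + 1)) v = xs.set (xs.length - (q + 1)) v := by
  simp only [PySem.List.pySetD, PySem.List.pySet?, PySem.List.pyIdx?]
  rw [if_neg (by omega), if_pos (by omega)]
  simp only [Option.map_some, Option.getD_some]
  rw [show (-(-((q:Int)+1))).toNat = q + 1 by omega]

theorem pvSet_mid (P Q : List Int) (k : Nat) (v : Int) :
    (P ++ List.replicate (k + 1) (0 : Int) ++ Q).set P.length v
      = P ++ (v :: List.replicate k 0) ++ Q := by
  rw [List.append_assoc, List.set_append, if_neg (by omega)]
  simp [List.replicate_succ]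

theorem pvSet_last (P Q : List Int) (k : Nat) (v : Int) :
    (P ++ List.replicate (k + 1) (0 : Int) ++ Q).set (P.length + k) v
      = P ++ (List.replicate k 0 ++ [v]) ++ Q := by
  have hrep : List.replicate (k+1) (0:Int) = List.replicate k 0 ++ [0] := by
    rw [← List.replicate_succ' ]
  rw [hrep, List.append_assoc, List.set_append, if_neg (by omega)]
  rw [List.append_assoc, List.set_append, if_neg (by simp)]
  simp

-- the build loop of A fills woods_weight as evens ++ reverse odds
theorem pv_build (ws : List Int) (m : Nat) (hm : m ≤ ws.length) :
    ∀ (rem : List Int) (a : Nat) (E R : List Int),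
      a + rem.length = m → E.length = R.length → E.length + R.length = a →
      (∀ (k : Nat) (hk : k < rem.length) (hk2 : a + k < ws.length), rem[k] = ws[a + k]) →
      ((PySem.List.pyRange (a : Int) (m : Int) 1).foldl
        (fun (st : List Int × Int × Int) i =>
          if PySem.Int.mod i 2 = 0 then
            (PySem.List.pySetD st.1 st.2.1 (PySem.List.pyGetD ws i 0), st.2.1 + 1, st.2.2)
          else
            (PySem.List.pySetD st.1 st.2.2 (PySem.List.pyGetD ws i 0), st.2.1, st.2.2 - 1))
        (E ++ List.replicate (m - a) 0 ++ R, (E.length : Int), -((R.length : Int) + 1))).1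
      = E ++ pvEvens rem ++ (pvOdds rem).reverse ++ R := by
  intro rem
  induction rem using pvOdds.induct with
  | case1 =>
    intro a E R ha hER hsum hrem
    simp at ha
    rw [PySem.List.pyRange_one_eq_nil (by omega)]
    simp [pvEvens, pvOdds]
    omega
  | case2 x =>
    intro a E R ha hER hsum hrem
    have ham : m = a + 1 := by simp at ha; omega
    rw [show (m : Int) = (a : Int) + 1 by omega, PySem.List.pyRange_one_singleton]
    have heven : PySem.Int.mod (a : Int) 2 = 0 := by
      rw [show (2:Int) = ((2:Nat):Int) by norm_num, PySem.Int.mod_natCast]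
      omega
    simp only [List.foldl_cons, List.foldl_nil, heven, if_pos]
    have hget : PySem.List.pyGetD ws (a : Int) 0 = ws[a]'(by omega) := by
      rw [PySem.List.pyGetD_ofNat ws a 0 (by omega)]
    simp only [hget, PySem.List.pySetD_natCast]
    rw [show m - a = 0 + 1 by omega, pvSet_mid E R 0 _]
    have := hrem 0 (by simp) (by omega)
    simp at this
    simp [pvEvens, pvOdds, this]
  | case3 x y l ih =>
    intro a E R ha hER hsum hrem
    have hml : a + (l.length + 2) = m := by simpa using ha
    -- peel i = a (even branch)
    rw [show ((a : Int)) = ((a : Nat) : Int) from rfl]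
    rw [PySem.List.pyRange_one_cons (by omega)]
    have heven : PySem.Int.mod (a : Int) 2 = 0 := by
      rw [show (2:Int) = ((2:Nat):Int) by norm_num, PySem.Int.mod_natCast]
      omega
    have hodd : PySem.Int.mod ((a : Int) + 1) 2 = 1 := by
      rw [show ((a : Int) + 1) = ((a + 1 : Nat) : Int) by push_cast; ring,
        show (2:Int) = ((2:Nat):Int) by norm_num, PySem.Int.mod_natCast]
      omega
    simp only [List.foldl_cons, heven, if_pos]
    have hgx : PySem.List.pyGetD ws (a : Int) 0 = x := by
      rw [PySem.List.pyGetD_ofNat ws a 0 (by omega)]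
      have := hrem 0 (by simp) (by omega)
      simpa using this.symm
    rw [hgx, PySem.List.pySetD_natCast,
      show m - a = (m - a - 1) + 1 by omega, pvSet_mid E R (m - a - 1) x]
    -- peel i = a + 1 (odd branch)
    rw [PySem.List.pyRange_one_cons (by omega)]
    simp only [List.foldl_cons, hodd]
    rw [if_neg (by omega)]
    have hgy : PySem.List.pyGetD ws ((a : Int) + 1) 0 = y := by
      rw [show ((a : Int) + 1) = ((a + 1 : Nat) : Int) by push_cast; ring,
        PySem.List.pyGetD_ofNat ws (a+1) 0 (by omega)]
      have := hrem 1 (by simp) (by omega)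
      simpa using this.symm
    rw [hgy]
    have hlenE1 : (E ++ (x :: List.replicate (m - a - 1) 0) ++ R).length = m := by
      simp; omega
    rw [pvSetD_neg _ R.length y (by rw [hlenE1]; omega)]
    rw [hlenE1]
    -- rearrange the list so that pvSet_last applies
    have hassoc : E ++ (x :: List.replicate (m - a - 1) 0) ++ R
        = (E ++ [x]) ++ List.replicate ((m - a - 2) + 1) 0 ++ R := by
      simp [show m - a - 1 = m - a - 2 + 1 by omega]
    rw [hassoc, show m - (R.length + 1) = (E ++ [x]).length + (m - a - 2) by simp; omega,
      pvSet_last (E ++ [x]) R (m - a - 2) y]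
    -- apply the induction hypothesis with a+2, E ++ [x], y :: R
    have hIH := ih (a + 2) (E ++ [x]) (y :: R)
      (by omega) (by simp; omega) (by simp; omega)
      (by
        intro k hk hk2
        have := hrem (k + 2) (by simp; omega) (by omega)
        simp only [List.getElem_cons_succ] at this
        rw [this]
        congr 1
        omega)
    have harg : (E ++ [x]) ++ (List.replicate (m - a - 2) 0 ++ [y]) ++ R
        = (E ++ [x]) ++ List.replicate (m - (a + 2)) 0 ++ (y :: R) := by
      simp [show m - (a + 2) = m - a - 2 by omega]
    rw [harg]
    rw [show ((a : Int) + 1 + 1) = (((a + 2 : Nat)) : Int) by push_cast; ring]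
    rw [show ((E.length : Int) + 1) = (((E ++ [x]).length : Int)) by simp]
    rw [show (-((R.length : Int) + 1) - 1) = -(((y :: R).length : Int) + 1) by simp; ring]
    rw [hIH]
    simp [pvEvens, pvOdds]

theorem pvArr_front (t : List Int) (j : Nat) (hj : 2 * j < t.length) :
    (pvArr t)[j]'(by rw [length_pvArr]; omega) = t[2 * j] := by
  rw [getElem_pvArr t j (by omega), dif_pos hj]

theorem pvArr_back (t : List Int) (j : Nat) (hj : j < t.length) (h2 : ¬ 2 * j < t.length) :
    (pvArr t)[j]'(by rw [length_pvArr]; omega) = t[2 * (t.length - 1 - j) + 1]'(by omega) := by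
  rw [getElem_pvArr t j hj, dif_neg h2]

theorem pv_foldl_le (g : Int → Int) (c : Int) :
    ∀ (l : List Int) (init : Int), init ≤ c → (∀ i ∈ l, g i ≤ c) →
      l.foldl (fun acc i => if acc < g i then g i else acc) init ≤ c
  | [], init, h0, _ => h0
  | a :: l, init, h0, h => by
    simp only [List.foldl_cons]
    exact pv_foldl_le g c l _
      (by split
          · exact h a (by simp)
          · exact h0)
      (fun i hi => h i (by simp [hi]))

theorem pv_le_foldl (g : Int → Int) :
    ∀ (l : List Int) (init : Int),
      init ≤ l.foldl (fun acc i => if acc < g i then g i else acc) init ∧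
      ∀ i ∈ l, g i ≤ l.foldl (fun acc i => if acc < g i then g i else acc) init
  | [], init => ⟨le_refl _, by simp⟩
  | a :: l, init => by
    simp only [List.foldl_cons, List.mem_cons]
    have step : init ≤ if init < g a then g a else init := by split <;> omega
    have stepa : g a ≤ if init < g a then g a else init := by split <;> omega
    obtain ⟨h1, h2⟩ := pv_le_foldl g l (if init < g a then g a else init)
    exact ⟨le_trans step h1, fun i hi => by
      rcases hi with rfl | hi
      · exact le_trans stepa h1
      · exact h2 i hi⟩

theorem pv_main (woods : List Int) (n : Int) (h1 : 1 ≤ n) (h2 : n ≤ (woods.length : Int)) :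
    level_print woods n = level_print_alt woods n := by
  obtain ⟨m, rfl⟩ : ∃ m : Nat, n = (m : Int) := ⟨n.toNat, by omega⟩
  have hm1 : 1 ≤ m := by omega
  simp only [level_print, level_print_alt, gt_iff_lt]
  set ws := PySem.List.sorted woods (fun x => x) false with hws
  have hlenws : ws.length = woods.length := PySem.List.length_sorted woods _ false
  have hmle : m ≤ ws.length := by omega
  -- the build loop produces pvArr (ws.take m)
  have hbuild := pv_build ws m hmle (ws.take m) 0 [] [] (by simp; omega) rfl rfl
    (fun k hk hk2 => by simp at hk ⊢)
  simp only [List.nil_append, List.append_nil, List.length_nil, Nat.cast_zero, Nat.sub_zero,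
    zero_add] at hbuild
  rw [show PySem.List.pyRepeat [(0:Int)] (m:Int) = List.replicate m (0:Int) by
    rw [PySem.List.pyRepeat_singleton]; simp]
  rw [show pvEvens (List.take m ws) ++ (pvOdds (List.take m ws)).reverse
      = pvArr (List.take m ws) from rfl] at hbuild
  rw [hbuild]
  set t := List.take m ws with ht
  have htlen : t.length = m := by simp [ht]; omega
  have htE : ∀ (k : Nat) (hk : k < m), t[k]'(by omega) = ws[k]'(by omega) := by
    intro k hk
    simp [ht]
  have hmono : ∀ p q : Nat, (hpq : p ≤ q) → (hq : q < m) → t[p]'(by rw [htlen]; omega) ≤ t[q]'(by rw [htlen]; omega) := by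
    intro p q hpq hq
    rw [htE p (by omega), htE q (by omega)]
    exact PySem.List.sorted_id_getElem_mono woods hpq (by rw [← hws]; omega)
  have habs : ∀ x y : Int, x ≤ y → |x - y| = y - x := fun x y h => by
    rw [abs_sub_comm, abs_of_nonneg (by omega)]
  have hne : pvArr t ≠ [] := by
    intro h
    have := length_pvArr t
    rw [h] at this
    simp at this
    omega
  have hzero : PySem.List.pyGetD (pvArr t) 0 0 = t[0]'(by rw [htlen]; omega) := by
    rw [PySem.List.pyGetD_eq_getElem _ _ (by norm_num) (by rw [length_pvArr, htlen]; omega)]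
    simp only [Int.toNat_zero]
    exact pvArr_front t 0 (by rw [htlen]; omega)
  rcases Nat.lt_or_ge m 2 with hm2 | hm2
  · -- m = 1
    have hm1' : m = 1 := by omega
    subst hm1'
    rw [if_pos (by norm_num)]
    rw [show ((1:Nat):Int) - 1 = 0 by norm_num, PySem.List.pyRange_one_eq_nil (le_refl 0)]
    simp only [List.foldl_nil]
    have hlast : PySem.List.pyGetD (pvArr t) (-1) 0 = t[0]'(by rw [htlen]; omega) := by
      rw [PySem.List.pyGetD_neg_one _ _ hne, List.getLast_eq_getElem]
      have h0 : (pvArr t).length - 1 = 0 := by rw [length_pvArr]; omega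
      rw [getElem_congr rfl h0 (by rw [length_pvArr]; omega)]
      exact pvArr_front t 0 (by omega)
    rw [hlast, hzero]
    omega
  · -- m ≥ 2
    rw [if_neg (by omega)]
    have hlast : PySem.List.pyGetD (pvArr t) (-1) 0 = t[1]'(by rw [htlen]; omega) := by
      rw [PySem.List.pyGetD_neg_one _ _ hne, List.getLast_eq_getElem]
      have h0 : (pvArr t).length - 1 = m - 1 := by rw [length_pvArr]; omega
      rw [getElem_congr rfl h0 (by rw [length_pvArr]; omega)]
      rw [pvArr_back t (m-1) (by omega) (by omega)]
      exact getElem_congr rfl (by omega) (by omega)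
    have hB1 : PySem.List.pyGetD ws 1 0 = t[1]'(by rw [htlen]; omega) := by
      rw [PySem.List.pyGetD_eq_getElem _ _ (by norm_num) (by omega)]
      simp only [Int.toNat_one]
      exact (htE 1 (by omega)).symm
    have hB00 : PySem.List.pyGetD ws 0 0 = t[0]'(by rw [htlen]; omega) := by
      rw [PySem.List.pyGetD_eq_getElem _ _ (by norm_num) (by omega)]
      simp only [Int.toNat_zero]
      exact (htE 0 (by omega)).symm
    rw [hlast, hzero, hB1, hB00]
    -- abbreviations for the two generators
    have hgetWs : ∀ (k : Nat) (hk : k < m), PySem.List.pyGetD ws ((k : Nat) : Int) 0 = t[k]'(by rw [htlen]; omega) := by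
      intro k hk
      rw [PySem.List.pyGetD_ofNat ws k 0 (by omega)]
      exact (htE k hk).symm
    have hgetArr : ∀ (k : Nat) (hk : k < m), PySem.List.pyGetD (pvArr t) ((k : Nat) : Int) 0 = (pvArr t)[k]'(by rw [length_pvArr, htlen]; omega) := by
      intro k hk
      rw [PySem.List.pyGetD_ofNat _ k 0 (by rw [length_pvArr, htlen]; omega)]
    apply le_antisymm
    · -- A's maximum is at most B's
      refine pv_foldl_le _ _ _ _ ?_ ?_
      · exact (pv_le_foldl (fun i => PySem.List.pyGetD ws (i+2) 0 - PySem.List.pyGetD ws i 0) _ _).1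
      · intro i hi
        rw [PySem.List.mem_pyRange_one] at hi
        obtain ⟨hi0, hi1⟩ := hi
        obtain ⟨j, rfl⟩ : ∃ j : Nat, i = (j : Int) := ⟨i.toNat, by omega⟩
        have hj1 : j + 1 < m := by omega
        rw [hgetArr j (by omega), show ((j:Int) + 1) = ((j+1 : Nat):Int) by push_cast; ring,
          hgetArr (j+1) (by omega)]
        rcases Nat.lt_or_ge (2*(j+1)) m with hc1 | hc1
        · -- both endpoints in the even front half
          rw [pvArr_front t j (by rw [htlen]; omega), pvArr_front t (j+1) (by rw [htlen]; omega)]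
          rw [habs _ _ (hmono (2*j) (2*(j+1)) (by omega) (by omega))]
          have hmem := (pv_le_foldl (fun i => PySem.List.pyGetD ws (i+2) 0 - PySem.List.pyGetD ws i 0) (PySem.List.pyRange 0 ((m:Int)-2)) (t[1]'(by rw [htlen]; omega) - t[0]'(by rw [htlen]; omega))).2
          have h2 := hmem ((2*j : Nat) : Int) (by rw [PySem.List.mem_pyRange_one]; constructor <;> omega)
          simp only [show ((2*j:Nat):Int) + 2 = ((2*j+2 : Nat):Int) by push_cast; ring] at h2
          rw [hgetWs (2*j+2) (by omega), hgetWs (2*j) (by omega)] at h2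
          rw [getElem_congr rfl (show 2*(j+1) = 2*j+2 by ring) (by rw [htlen]; omega)]
          exact h2
        · rcases Nat.lt_or_ge (2*j) m with hc2 | hc2
          · -- the junction pair: its gap is t[m-1] - t[m-2]
            rw [pvArr_front t j (by rw [htlen]; omega), pvArr_back t (j+1) (by rw [htlen]; omega) (by rw [htlen]; omega)]
            simp only [htlen]
            have hjunc : |t[2*j]'(by rw [htlen]; omega) - t[2*(m-1-(j+1))+1]'(by rw [htlen]; omega)|
                = t[m-1]'(by rw [htlen]; omega) - t[m-2]'(by rw [htlen]; omega) := by
              rcases (show m = 2*j+1 ∨ m = 2*j+2 by omega) with hm | hm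
              · rw [getElem_congr rfl (show 2*j = m-1 by omega) (by rw [htlen]; omega),
                  getElem_congr rfl (show 2*(m-1-(j+1))+1 = m-2 by omega) (by rw [htlen]; omega)]
                exact abs_of_nonneg (by have := hmono (m-2) (m-1) (by omega) (by omega); omega)
              · rw [getElem_congr rfl (show 2*j = m-2 by omega) (by rw [htlen]; omega),
                  getElem_congr rfl (show 2*(m-1-(j+1))+1 = m-1 by omega) (by rw [htlen]; omega)]
                exact habs _ _ (hmono (m-2) (m-1) (by omega) (by omega))
            rw [hjunc]
            rcases Nat.lt_or_ge m 3 with hm3 | hm3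
            · -- m = 2: the junction gap is the seed t[1] - t[0]
              rw [getElem_congr rfl (show m-1 = 1 by omega) (by rw [htlen]; omega),
                getElem_congr rfl (show m-2 = 0 by omega) (by rw [htlen]; omega)]
              exact (pv_le_foldl (fun i => PySem.List.pyGetD ws (i+2) 0 - PySem.List.pyGetD ws i 0) _ _).1
            · -- m ≥ 3: bounded by the two-apart gap t[m-1] - t[m-3]
              have hmem := (pv_le_foldl (fun i => PySem.List.pyGetD ws (i+2) 0 - PySem.List.pyGetD ws i 0) (PySem.List.pyRange 0 ((m:Int)-2)) (t[1]'(by rw [htlen]; omega) - t[0]'(by rw [htlen]; omega))).2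
              have h2 := hmem ((m-3 : Nat) : Int) (by rw [PySem.List.mem_pyRange_one]; constructor <;> omega)
              simp only [show ((m-3:Nat):Int) + 2 = ((m-1 : Nat):Int) by omega] at h2
              rw [hgetWs (m-1) (by omega), hgetWs (m-3) (by omega)] at h2
              have := hmono (m-3) (m-2) (by omega) (by omega)
              omega
          · -- both endpoints in the reversed odd back half
            rw [pvArr_back t j (by rw [htlen]; omega) (by rw [htlen]; omega),
              pvArr_back t (j+1) (by rw [htlen]; omega) (by rw [htlen]; omega)]
            simp only [htlen]
            rw [getElem_congr rfl (show 2*(m-1-j)+1 = (2*(m-1-(j+1))+1)+2 by omega) (by rw [htlen]; omega)]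
            rw [abs_of_nonneg (by
              have := hmono (2*(m-1-(j+1))+1) ((2*(m-1-(j+1))+1)+2) (by omega) (by omega)
              omega)]
            have hmem := (pv_le_foldl (fun i => PySem.List.pyGetD ws (i+2) 0 - PySem.List.pyGetD ws i 0) (PySem.List.pyRange 0 ((m:Int)-2)) (t[1]'(by rw [htlen]; omega) - t[0]'(by rw [htlen]; omega))).2
            have h2 := hmem ((2*(m-1-(j+1))+1 : Nat) : Int) (by rw [PySem.List.mem_pyRange_one]; constructor <;> omega)
            simp only [show ((2*(m-1-(j+1))+1:Nat):Int) + 2 = (((2*(m-1-(j+1))+1)+2 : Nat):Int) by push_cast; ring] at h2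
            rw [hgetWs ((2*(m-1-(j+1))+1)+2) (by omega), hgetWs (2*(m-1-(j+1))+1) (by omega)] at h2
            exact h2
    · -- B's maximum is at most A's
      refine pv_foldl_le _ _ _ _ ?_ ?_
      · exact (pv_le_foldl (fun i => |PySem.List.pyGetD (pvArr t) i 0 - PySem.List.pyGetD (pvArr t) (i+1) 0|) _ _).1
      · intro i hi
        rw [PySem.List.mem_pyRange_one] at hi
        obtain ⟨hi0, hi1⟩ := hi
        obtain ⟨j, rfl⟩ : ∃ j : Nat, i = (j : Int) := ⟨i.toNat, by omega⟩
        have hj2 : j + 2 < m := by omega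
        rw [show ((j:Int) + 2) = ((j+2 : Nat):Int) by push_cast; ring,
          hgetWs (j+2) (by omega), hgetWs j (by omega)]
        have hA := (pv_le_foldl (fun i => |PySem.List.pyGetD (pvArr t) i 0 - PySem.List.pyGetD (pvArr t) (i+1) 0|) (PySem.List.pyRange 0 ((m:Int)-1)) (t[1]'(by rw [htlen]; omega) - t[0]'(by rw [htlen]; omega))).2
        rcases Nat.even_or_odd j with ⟨p, hp⟩ | ⟨p, hp⟩
        · -- even j = 2p: the pair sits in the front half
          have h2 := hA ((p : Nat) : Int) (by rw [PySem.List.mem_pyRange_one]; constructor <;> omega)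
          rw [hgetArr p (by omega), show ((p:Int) + 1) = ((p+1 : Nat):Int) by push_cast; ring,
            hgetArr (p+1) (by omega)] at h2
          rw [pvArr_front t p (by rw [htlen]; omega), pvArr_front t (p+1) (by rw [htlen]; omega)] at h2
          rw [habs _ _ (hmono (2*p) (2*(p+1)) (by omega) (by omega))] at h2
          rw [getElem_congr rfl (show 2*(p+1) = j+2 by omega) (by rw [htlen]; omega),
            getElem_congr rfl (show 2*p = j by omega) (by rw [htlen]; omega)] at h2
          exact h2
        · -- odd j = 2p+1: the pair sits reversed in the back half
          have h2 := hA ((m-2-p : Nat) : Int) (by rw [PySem.List.mem_pyRange_one]; constructor <;> omega)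
          rw [hgetArr (m-2-p) (by omega), show (((m-2-p:Nat):Int) + 1) = ((m-1-p : Nat):Int) by omega,
            hgetArr (m-1-p) (by omega)] at h2
          rw [pvArr_back t (m-2-p) (by rw [htlen]; omega) (by rw [htlen]; omega),
            pvArr_back t (m-1-p) (by rw [htlen]; omega) (by rw [htlen]; omega)] at h2
          simp only [htlen] at h2
          rw [getElem_congr rfl (show 2*(m-1-(m-2-p))+1 = j+2 by omega) (by rw [htlen]; omega),
            getElem_congr rfl (show 2*(m-1-(m-1-p))+1 = j by omega) (by rw [htlen]; omega)] at h2
          rw [abs_of_nonneg (by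
            have := hmono j (j+2) (by omega) (by omega)
            omega)] at h2
          exact h2

-- ===== VERDICT (by name: the statement is the Claim_ definition above) =====
theorem level_print_spec : Claim_equal_level_print := by
  intro woods n _hdom hpre
  exact pv_main woods n hpre.1 hpre.2
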